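-- pv_equiv track=rewrite | github.com/svercillo/LeetcodeAlgorithms | data_structures-n-algos/permutations.py | permutations_of_indexes
-- ===== SOURCE A (Python) =====
-- def permutations_of_indexes(n):
--     perms = []
--     last_row = [[]]
--
--     for i in range(n +1):
--
--         next_row = []
--         for ele in last_row:
--             for j in range(0, n):
--                 old_list = ele.copy()
--                 old_list.append(j)
--
--
--                 next_row.append(old_list)
--
--         perms.extend(last_row)
--
--         last_row = next_row.copy()
--
--     perms.extend(last_row)
--
--     return perms
-- ===== SOURCE B (Python) =====
-- def permutations_of_indexes(n):
--     # Sequences of each length built independently by recursion (prepend a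
--     # first index to every shorter sequence); the empty sequence always exists,
--     # then lengths 1 .. n+1 are added.
--     def seqs(k):
--         if k == 0:
--             return [[]]
--         return [[j] + rest for j in range(n) for rest in seqs(k - 1)]
--
--     result = [[]]
--     for k in range(1, n + 2):
--         result += seqs(k)
--     return result
-- ===== Notes on version B (the rewrite author's own statement) =====
-- stated objective: simpler
-- what changed: B generates the sequences of each length independently by a recursion that prepends a first index to every shorter sequence, starting from the always-present empty sequence, instead of A's maintained last_row that is extended on the right row by row.
import Mathlib
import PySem

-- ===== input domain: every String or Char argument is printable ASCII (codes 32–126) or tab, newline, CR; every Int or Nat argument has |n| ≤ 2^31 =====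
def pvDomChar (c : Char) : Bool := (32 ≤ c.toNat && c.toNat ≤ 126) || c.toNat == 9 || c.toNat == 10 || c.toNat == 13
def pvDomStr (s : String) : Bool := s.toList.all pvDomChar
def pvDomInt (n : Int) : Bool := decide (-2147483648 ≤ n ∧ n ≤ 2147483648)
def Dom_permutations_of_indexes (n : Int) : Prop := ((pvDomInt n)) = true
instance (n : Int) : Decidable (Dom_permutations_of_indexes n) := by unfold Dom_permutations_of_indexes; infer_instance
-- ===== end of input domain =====

-- B rebuilds the sequences of each length independently (prepend-recursion from the empty
-- sequence) instead of maintaining and extending A's last_row; objective: simpler.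


-- ===== PORT A =====
-- literal transliteration: perms/last_row state, outer loop over range(n+1),
-- inner loops build next_row by appending ele+[j] for each ele, each j in range(n)
def permutations_of_indexes (n : Int) : List (List Int) :=
  let st := (PySem.List.pyRange 0 (n + 1)).foldl
    (fun (st : List (List Int) × List (List Int)) _i =>
      let next_row := st.2.foldl
        (fun nr ele =>
          (PySem.List.pyRange 0 n).foldl (fun nr2 j => nr2 ++ [ele ++ [j]]) nr)
        []
      (st.1 ++ st.2, next_row))
    ([], [[]])
  st.1 ++ st.2

-- ===== PORT B =====
-- seqs(k) from Source B: recursion on k, prepending each j in range(n) to every shorter sequence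
def pvSeqs (n : Int) : Nat → List (List Int)
  | 0 => [[]]
  | k + 1 => (PySem.List.pyRange 0 n).flatMap
      (fun j => (pvSeqs n k).map (fun rest => j :: rest))

-- Source B: result = [[]], then result += seqs(k) for k in range(1, n+2);
-- the loop index k is ≥ 1, so .toNat is exact on it and feeds the structural recursion
def permutations_of_indexes_alt (n : Int) : List (List Int) :=
  (PySem.List.pyRange 1 (n + 2)).foldl (fun acc k => acc ++ pvSeqs n k.toNat) [[]]

-- ===== PRECONDITION & SPEC =====
def Spec_permutations_of_indexes (n : Int) (out : List (List Int)) : Prop := out = permutations_of_indexes_alt n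
instance (n : Int) (out : List (List Int)) : Decidable (Spec_permutations_of_indexes n out) := by unfold Spec_permutations_of_indexes; infer_instance

-- ===== CLAIM (what is proved, stated in full; the proofs are below) =====
def Claim_equal_permutations_of_indexes : Prop := ∀ (n : Int), Dom_permutations_of_indexes n → Spec_permutations_of_indexes n (permutations_of_indexes n)

-- ===== LEMMAS AND PROOFS =====

-- extending every length-k sequence on the right by each j equals B's length-(k+1) family
theorem pvSeqs_step (n : Int) (k : Nat) :
    (pvSeqs n k).flatMap (fun e => (PySem.List.pyRange 0 n).map (fun j => e ++ [j]))
      = pvSeqs n (k + 1) := by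
  induction k with
  | zero =>
    simp only [pvSeqs, List.flatMap_singleton]
    exact List.map_eq_flatMap
  | succ k ih =>
    simp only [pvSeqs, List.flatMap_assoc, List.flatMap_map]
    simp only [List.cons_append]
    calc (PySem.List.pyRange 0 n).flatMap
          (fun j => (pvSeqs n k).flatMap (fun e => (PySem.List.pyRange 0 n).map (fun j2 => j :: (e ++ [j2]))))
        = (PySem.List.pyRange 0 n).flatMap
            (fun j => ((pvSeqs n k).flatMap (fun e => (PySem.List.pyRange 0 n).map (fun j2 => e ++ [j2]))).map (fun rest => j :: rest)) := by
          simp [List.map_flatMap, List.map_map, Function.comp_def]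
      _ = (PySem.List.pyRange 0 n).flatMap (fun j => (pvSeqs n (k + 1)).map (fun rest => j :: rest)) := by
          rw [ih]

-- A's outer loop invariant: starting from (p, pvSeqs n k), after |l| iterations the state is
-- (p ++ all rows k..k+|l|-1, pvSeqs n (k+|l|)); the loop body ignores the element of l
theorem pvLoopA (n : Int) (l : List Int) : ∀ (p : List (List Int)) (k : Nat),
    l.foldl
      (fun (st : List (List Int) × List (List Int)) _i =>
        let next_row := st.2.foldl
          (fun nr ele =>
            (PySem.List.pyRange 0 n).foldl (fun nr2 j => nr2 ++ [ele ++ [j]]) nr)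
          []
        (st.1 ++ st.2, next_row))
      (p, pvSeqs n k)
      = (p ++ (List.range l.length).flatMap (fun i => pvSeqs n (k + i)), pvSeqs n (k + l.length)) := by
  induction l with
  | nil => intro p k; simp
  | cons a l ih =>
    intro p k
    have hnext : (pvSeqs n k).foldl
        (fun nr ele =>
          (PySem.List.pyRange 0 n).foldl (fun nr2 j => nr2 ++ [ele ++ [j]]) nr)
        [] = pvSeqs n (k + 1) := by
      have h1 : ∀ (nr : List (List Int)) (ele : List Int),
          (PySem.List.pyRange 0 n).foldl (fun nr2 j => nr2 ++ [ele ++ [j]]) nr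
            = nr ++ (PySem.List.pyRange 0 n).map (fun j => ele ++ [j]) := by
        intro nr ele
        exact PySem.List.foldl_append_singleton_eq_map (fun j => ele ++ [j]) _ nr
      calc (pvSeqs n k).foldl
            (fun nr ele =>
              (PySem.List.pyRange 0 n).foldl (fun nr2 j => nr2 ++ [ele ++ [j]]) nr) []
          = (pvSeqs n k).foldl
              (fun nr ele => nr ++ (PySem.List.pyRange 0 n).map (fun j => ele ++ [j])) [] := by
            exact PySem.List.foldl_congr_mem _ _ _ _ (fun nr ele _ => h1 nr ele)
        _ = [] ++ (pvSeqs n k).flatMap (fun ele => (PySem.List.pyRange 0 n).map (fun j => ele ++ [j])) :=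
            PySem.List.foldl_append_eq_flatMap _ _ _
        _ = pvSeqs n (k + 1) := by rw [List.nil_append, pvSeqs_step]
    simp only [List.foldl_cons, hnext]
    rw [ih (p ++ pvSeqs n k) (k + 1)]
    have hidx : (fun i : Nat => pvSeqs n (k + Nat.succ i)) = (fun i : Nat => pvSeqs n (k + 1 + i)) :=
      funext fun i => by rw [show k + Nat.succ i = k + 1 + i from by omega]
    have hr : (List.range (l.length + 1)).flatMap (fun i => pvSeqs n (k + i))
        = pvSeqs n k ++ (List.range l.length).flatMap (fun i => pvSeqs n (k + 1 + i)) := by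
      rw [List.range_succ_eq_map, List.flatMap_cons, List.flatMap_map, hidx, Nat.add_zero]
    have hk : k + 1 + l.length = k + (l.length + 1) := by omega
    simp only [List.length_cons, Prod.mk.injEq]
    exact ⟨by rw [hr, List.append_assoc], by rw [hk]⟩

-- range(1, t+1) is 1..t, the successors of range(t)
theorem pvRangeShift (t : Nat) :
    PySem.List.pyRange 1 ((t : Int) + 1) = List.map (fun i : Nat => ((i : Int) + 1)) (List.range t) := by
  induction t with
  | zero => decide
  | succ t ih =>
    have h : (((t + 1 : Nat)) : Int) + 1 = ((t : Int) + 1) + 1 := by push_cast; ring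
    rw [h, PySem.List.pyRange_one_succ_right (by omega), ih, List.range_succ, List.map_append]
    rfl

-- ===== VERDICT (by name: the statement is the Claim_ definition above) =====
theorem permutations_of_indexes_spec : Claim_equal_permutations_of_indexes := by
  intro n _
  show permutations_of_indexes n = permutations_of_indexes_alt n
  by_cases hn : 0 ≤ n
  · -- main case: n ≥ 0
    have h1 : n + 1 = (((n + 1).toNat : Nat) : Int) := (Int.toNat_of_nonneg (by omega)).symm
    set t := (n + 1).toNat with ht
    have hA : permutations_of_indexes n = (List.range (t + 1)).flatMap (pvSeqs n) := by
      simp only [permutations_of_indexes]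
      rw [h1, PySem.List.pyRange_zero_natCast]
      rw [show ([[]] : List (List Int)) = pvSeqs n 0 from rfl]
      rw [pvLoopA]
      simp [List.range_succ]
    have hB : permutations_of_indexes_alt n = (List.range (t + 1)).flatMap (pvSeqs n) := by
      simp only [permutations_of_indexes_alt]
      rw [show (n + 2 : Int) = (t : Int) + 1 from by omega, pvRangeShift, List.foldl_map]
      have hcast : ∀ i : Nat, ((i : Int) + 1).toNat = i + 1 := by intro i; omega
      simp only [hcast]
      rw [PySem.List.foldl_append_eq_flatMap]
      rw [List.range_succ_eq_map, List.flatMap_cons, List.flatMap_map]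
      rfl
    rw [hA, hB]
  · -- degenerate case: n < 0, both loops run zero times and both return [[]]
    simp only [permutations_of_indexes, permutations_of_indexes_alt]
    rw [PySem.List.pyRange_one_eq_nil (show n + 1 ≤ 0 by omega),
        PySem.List.pyRange_one_eq_nil (show n + 2 ≤ 1 by omega)]
    rfl
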